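-- pv_equiv track=rewrite | github.com/hack-parthsharma/LeetCode | 1534-count-good-triplets/1534-count-good-triplets.py | countGoodTriplets
-- ===== SOURCE A (Python) =====
-- def countGoodTriplets(arr, a, b, c):
--
--     count = 0
--
--     for i in range(len(arr)):
--         for j in range(i + 1, len(arr)):
--             if abs(arr[i] - arr[j]) <= a:
--                 for k in range(j + 1, len(arr)):
--                     if abs(arr[j] - arr[k]) <= b and abs(arr[i] - arr[k]) <= c:
--                         count += 1
--
--     return count
-- ===== SOURCE B (Python) =====
-- def countGoodTriplets(arr, a, b, c):
--     # One left-to-right pass: keep the list of already-good (arr[i], arr[j]) pairs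
--     # (|arr[i]-arr[j]| <= a, i < j) and the values seen so far; each new element
--     # closes every stored pair that satisfies the b- and c-bounds.
--     count = 0
--     pairs = []
--     seen = []
--     for x in arr:
--         for (u, v) in pairs:
--             if abs(v - x) <= b and abs(u - x) <= c:
--                 count += 1
--         pairs += [(y, x) for y in seen if abs(y - x) <= a]
--         seen.append(x)
--     return count
-- ===== Notes on version B (the rewrite author's own statement) =====
-- stated objective: alternative
-- what changed: Replaces the triple nested index loop with a single left-to-right pass that accumulates the list of already-good (i,j) pairs and, for each new element, counts the stored pairs it closes.
import Mathlib
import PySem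

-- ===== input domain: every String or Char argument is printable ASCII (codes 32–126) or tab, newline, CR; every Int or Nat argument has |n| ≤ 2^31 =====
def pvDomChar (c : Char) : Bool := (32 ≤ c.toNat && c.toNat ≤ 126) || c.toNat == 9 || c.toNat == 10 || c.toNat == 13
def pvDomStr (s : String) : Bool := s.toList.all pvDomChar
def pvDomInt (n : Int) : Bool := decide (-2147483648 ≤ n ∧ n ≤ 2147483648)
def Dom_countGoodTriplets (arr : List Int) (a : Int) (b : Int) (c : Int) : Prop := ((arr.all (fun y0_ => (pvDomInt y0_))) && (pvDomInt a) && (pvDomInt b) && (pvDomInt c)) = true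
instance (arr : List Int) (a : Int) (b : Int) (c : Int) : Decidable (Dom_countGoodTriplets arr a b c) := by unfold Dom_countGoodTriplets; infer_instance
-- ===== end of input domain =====

-- B replaces A's triple nested index loops by one left-to-right pass accumulating the good (i,j) pairs (objective: alternative algorithm).

-- ===== PORT A =====
def countGoodTriplets (arr : List Int) (a : Int) (b : Int) (c : Int) : Int :=
  (PySem.List.pyRange 0 (PySem.List.len arr) 1).foldl (fun count i =>
    (PySem.List.pyRange (i + 1) (PySem.List.len arr) 1).foldl (fun count j =>
      if |PySem.List.pyGetD arr i 0 - PySem.List.pyGetD arr j 0| ≤ a then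
        (PySem.List.pyRange (j + 1) (PySem.List.len arr) 1).foldl (fun count k =>
          if |PySem.List.pyGetD arr j 0 - PySem.List.pyGetD arr k 0| ≤ b ∧
             |PySem.List.pyGetD arr i 0 - PySem.List.pyGetD arr k 0| ≤ c then count + 1 else count) count
      else count) count) 0

-- ===== PORT B =====
def countGoodTriplets_alt (arr : List Int) (a : Int) (b : Int) (c : Int) : Int :=
  (arr.foldl (fun (s : Int × List (Int × Int) × List Int) x =>
      let cnt := s.2.1.foldl (fun cnt p =>
        if |p.2 - x| ≤ b ∧ |p.1 - x| ≤ c then cnt + 1 else cnt) s.1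
      (cnt,
       s.2.1 ++ (s.2.2.filter (fun y => decide (|y - x| ≤ a))).map (fun y => (y, x)),
       s.2.2 ++ [x]))
    (0, [], [])).1

-- ===== PRECONDITION & SPEC =====
def Spec_countGoodTriplets (arr : List Int) (a : Int) (b : Int) (c : Int) (out : Int) : Prop := out = countGoodTriplets_alt arr a b c
instance (arr : List Int) (a : Int) (b : Int) (c : Int) (out : Int) : Decidable (Spec_countGoodTriplets arr a b c out) := by unfold Spec_countGoodTriplets; infer_instance

-- ===== CLAIM (what is proved, stated in full; the proofs are below) =====
def Claim_equal_countGoodTriplets : Prop := ∀ (arr : List Int) (a : Int) (b : Int) (c : Int), Dom_countGoodTriplets arr a b c → Spec_countGoodTriplets arr a b c (countGoodTriplets arr a b c)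

-- ===== LEMMAS AND PROOFS =====

-- number of elements of l that close the pair (vi, vj)
def cntIn (b c vi vj : Int) (l : List Int) : Int :=
  (l.countP (fun z => decide (|vj - z| ≤ b ∧ |vi - z| ≤ c)) : Int)

-- good triplets with first value vi and middle/last values in l (in order)
def pairC (a b c vi : Int) : List Int → Int
  | [] => 0
  | vj :: rest => (if |vi - vj| ≤ a then cntIn b c vi vj rest else 0) + pairC a b c vi rest

-- good triplets entirely inside l
def tripC (a b c : Int) : List Int → Int
  | [] => 0
  | x :: rest => pairC a b c x rest + tripC a b c rest

-- sum over stored pairs of how many elements of l close them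
def pairsClose (b c : Int) (pairs : List (Int × Int)) (l : List Int) : Int :=
  (pairs.map (fun p => cntIn b c p.1 p.2 l)).sum

-- triplets whose first element is in seen and whose other two are in l
def seenTrip (a b c : Int) (seen l : List Int) : Int :=
  (seen.map (fun y => pairC a b c y l)).sum

theorem cntIn_cons (b c vi vj x : Int) (l : List Int) :
    cntIn b c vi vj (x :: l) =
      (if |vj - x| ≤ b ∧ |vi - x| ≤ c then 1 else 0) + cntIn b c vi vj l := by
  unfold cntIn
  rw [List.countP_cons]
  push_cast
  by_cases h1 : |vj - x| ≤ b <;> by_cases h2 : |vi - x| ≤ c <;> simp [h1, h2]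
  ring

theorem pairsClose_cons (b c : Int) (pairs : List (Int × Int)) (x : Int) (l : List Int) :
    pairsClose b c pairs (x :: l) =
      (pairs.countP (fun p => decide (|p.2 - x| ≤ b ∧ |p.1 - x| ≤ c)) : Int)
        + pairsClose b c pairs l := by
  induction pairs with
  | nil => simp [pairsClose]
  | cons p ps ih =>
    simp only [pairsClose, List.map_cons, List.sum_cons, List.countP_cons] at *
    rw [cntIn_cons]
    by_cases h1 : |p.2 - x| ≤ b <;> by_cases h2 : |p.1 - x| ≤ c <;>
      simp [h1, h2, ih] <;> ring

theorem pairsClose_append (b c : Int) (ps qs : List (Int × Int)) (l : List Int) :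
    pairsClose b c (ps ++ qs) l = pairsClose b c ps l + pairsClose b c qs l := by
  simp [pairsClose]

theorem seenTrip_append_singleton (a b c : Int) (seen l : List Int) (x : Int) :
    seenTrip a b c (seen ++ [x]) l = seenTrip a b c seen l + pairC a b c x l := by
  simp [seenTrip]

theorem seenTrip_cons (a b c : Int) (seen : List Int) (x : Int) (l : List Int) :
    seenTrip a b c seen (x :: l) =
      pairsClose b c ((seen.filter (fun y => decide (|y - x| ≤ a))).map (fun y => (y, x))) l
        + seenTrip a b c seen l := by
  induction seen with
  | nil => simp [seenTrip, pairsClose]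
  | cons y ys ih =>
    simp only [seenTrip, List.map_cons, List.sum_cons, List.filter_cons] at *
    rw [pairC]
    split_ifs with h <;> simp [h] at * <;> rw [ih] <;> simp [pairsClose] <;> ring

-- B's loop invariant
theorem alt_invariant (a b c : Int) (l : List Int) :
    ∀ (cnt : Int) (pairs : List (Int × Int)) (seen : List Int),
    (l.foldl (fun (s : Int × List (Int × Int) × List Int) x =>
      let cnt := s.2.1.foldl (fun cnt p =>
        if |p.2 - x| ≤ b ∧ |p.1 - x| ≤ c then cnt + 1 else cnt) s.1
      (cnt,
       s.2.1 ++ (s.2.2.filter (fun y => decide (|y - x| ≤ a))).map (fun y => (y, x)),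
       s.2.2 ++ [x]))
      (cnt, pairs, seen)).1
    = cnt + pairsClose b c pairs l + seenTrip a b c seen l + tripC a b c l := by
  induction l with
  | nil => intro cnt pairs seen; simp [pairsClose, cntIn, seenTrip, tripC, pairC]
  | cons x rest ih =>
    intro cnt pairs seen
    simp only [List.foldl_cons]
    rw [ih]
    rw [PySem.List.foldl_ite_add_one]
    rw [pairsClose_append, seenTrip_append_singleton, pairsClose_cons, seenTrip_cons, tripC]
    ring

-- the k-loop of A counts the closers of (vi, vj) in the suffix
theorem inner_loop (arr : List Int) (b c vi vj : Int) (j : Int) (hj : 0 ≤ j) (cnt : Int) :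
    (PySem.List.pyRange j (PySem.List.len arr) 1).foldl (fun count k =>
      if |vj - PySem.List.pyGetD arr k 0| ≤ b ∧
         |vi - PySem.List.pyGetD arr k 0| ≤ c then count + 1 else count) cnt
    = cnt + cntIn b c vi vj (arr.drop j.toNat) := by
  rw [PySem.List.foldl_pyRange_pyGetD arr 0 (fun count z =>
        if |vj - z| ≤ b ∧ |vi - z| ≤ c then count + 1 else count) cnt hj]
  rw [PySem.List.foldl_ite_add_one]
  rfl

-- the j-loop of A from index j computes pairC on the suffix
theorem mid_loop (arr : List Int) (a b c vi : Int) :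
    ∀ (m jn : Nat), jn + m = arr.length → ∀ (cnt : Int),
    (PySem.List.pyRange (jn : Int) (PySem.List.len arr) 1).foldl (fun count j =>
      if |vi - PySem.List.pyGetD arr j 0| ≤ a then
        (PySem.List.pyRange (j + 1) (PySem.List.len arr) 1).foldl (fun count k =>
          if |PySem.List.pyGetD arr j 0 - PySem.List.pyGetD arr k 0| ≤ b ∧
             |vi - PySem.List.pyGetD arr k 0| ≤ c then count + 1 else count) count
      else count) cnt
    = cnt + pairC a b c vi (arr.drop jn) := by
  intro m
  induction m with
  | zero =>
    intro jn h cnt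
    rw [PySem.List.pyRange_one_eq_nil (by simp; omega)]
    rw [List.drop_of_length_le (by omega)]
    simp [pairC]
  | succ m ih =>
    intro jn h cnt
    have hjn : jn < arr.length := by omega
    rw [PySem.List.pyRange_one_cons (by simp; exact_mod_cast hjn)]
    simp only [List.foldl_cons]
    have hcast : (jn : Int) + 1 = ((jn + 1 : Nat) : Int) := by push_cast; ring
    rw [List.drop_eq_getElem_cons hjn, pairC]
    have hget : PySem.List.pyGetD arr (jn : Int) 0 = arr[jn] := by
      simp [PySem.List.pyGetD_natCast, List.getD_eq_getElem?_getD, hjn]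
    rw [hget, hcast, ih (jn + 1) (by omega)]
    rw [inner_loop arr b c vi (arr[jn]) ((jn + 1 : Nat) : Int) (by positivity)]
    simp only [Int.toNat_natCast]
    split_ifs <;> ring

-- the i-loop of A from index i computes tripC on the suffix
theorem outer_loop (arr : List Int) (a b c : Int) :
    ∀ (m iN : Nat), iN + m = arr.length → ∀ (cnt : Int),
    (PySem.List.pyRange (iN : Int) (PySem.List.len arr) 1).foldl (fun count i =>
      (PySem.List.pyRange (i + 1) (PySem.List.len arr) 1).foldl (fun count j =>
        if |PySem.List.pyGetD arr i 0 - PySem.List.pyGetD arr j 0| ≤ a then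
          (PySem.List.pyRange (j + 1) (PySem.List.len arr) 1).foldl (fun count k =>
            if |PySem.List.pyGetD arr j 0 - PySem.List.pyGetD arr k 0| ≤ b ∧
               |PySem.List.pyGetD arr i 0 - PySem.List.pyGetD arr k 0| ≤ c then count + 1 else count) count
        else count) count) cnt
    = cnt + tripC a b c (arr.drop iN) := by
  intro m
  induction m with
  | zero =>
    intro iN h cnt
    rw [PySem.List.pyRange_one_eq_nil (by simp; omega)]
    rw [List.drop_of_length_le (by omega)]
    simp [tripC]
  | succ m ih =>
    intro iN h cnt
    have hiN : iN < arr.length := by omega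
    rw [PySem.List.pyRange_one_cons (by simp; exact_mod_cast hiN)]
    simp only [List.foldl_cons]
    have hcast : (iN : Int) + 1 = ((iN + 1 : Nat) : Int) := by push_cast; ring
    rw [List.drop_eq_getElem_cons hiN, tripC]
    have hget : PySem.List.pyGetD arr (iN : Int) 0 = arr[iN] := by
      simp [PySem.List.pyGetD_natCast, List.getD_eq_getElem?_getD, hiN]
    rw [hget, hcast, ih (iN + 1) (by omega)]
    rw [mid_loop arr a b c (arr[iN]) (arr.length - (iN + 1)) (iN + 1) (by omega)]
    ring

-- ===== VERDICT (by name: the statement is the Claim_ definition above) =====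
theorem countGoodTriplets_spec : Claim_equal_countGoodTriplets := by
  intro arr a b c _
  unfold Spec_countGoodTriplets countGoodTriplets countGoodTriplets_alt
  have hA := outer_loop arr a b c arr.length 0 (by omega) 0
  have hB := alt_invariant a b c arr 0 [] []
  simp only [Nat.cast_zero, List.drop_zero] at hA
  rw [hA, hB]
  simp [pairsClose, seenTrip]
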